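-- pv_equiv track=rewrite | github.com/ryb-spec/chumash-question-engine | pasuk_flow_generator.py | root_meaning
-- ===== SOURCE A (Python) =====
-- def root_meaning(entry):
--     text = entry.get("translation", "")
--     for lead in [
--         "from his ",
--         "to his ",
--         "in his ",
--         "from the ",
--         "to the ",
--         "in the ",
--         "the ",
--         "his ",
--     ]:
--         if text.startswith(lead):
--             return text[len(lead):]
--     return text
-- ===== SOURCE B (Python) =====
-- def root_meaning(entry):
--     text = entry.get("translation", "")
--     rest = text
--     for prep in ("from ", "to ", "in "):
--         if text.startswith(prep):
--             rest = text[len(prep):]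
--             break
--     for art in ("the ", "his "):
--         if rest.startswith(art):
--             return rest[len(art):]
--     return text
-- ===== Notes on version B (the rewrite author's own statement) =====
-- stated objective: simpler
-- what changed: A scans eight pre-concatenated prefixes in priority order; B decomposes the prefix grammar into two small passes: strip an optional preposition ('from '/'to '/'in '), then require and strip an article/possessive ('the '/'his '), falling back to the original text if no article follows.
import Mathlib
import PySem

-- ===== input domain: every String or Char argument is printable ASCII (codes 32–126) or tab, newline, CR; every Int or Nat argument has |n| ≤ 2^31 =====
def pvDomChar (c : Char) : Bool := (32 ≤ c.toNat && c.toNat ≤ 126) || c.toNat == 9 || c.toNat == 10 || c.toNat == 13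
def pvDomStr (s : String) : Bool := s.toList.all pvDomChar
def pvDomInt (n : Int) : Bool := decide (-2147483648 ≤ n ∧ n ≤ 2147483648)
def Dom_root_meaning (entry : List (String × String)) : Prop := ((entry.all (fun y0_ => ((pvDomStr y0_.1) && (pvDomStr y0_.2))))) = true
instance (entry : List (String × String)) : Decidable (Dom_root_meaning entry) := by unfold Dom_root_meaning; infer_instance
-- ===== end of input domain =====

-- B: instead of A's linear scan over eight concatenated prefixes, strip an optional
-- preposition ("from "/"to "/"in ") and then a mandatory article/possessive ("the "/"his ");
-- objective: simpler (two small passes over 3+2 atoms instead of one over 8 composites).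


-- ===== PORT A =====
-- the 'for lead in [...]: if text.startswith(lead): return text[len(lead):]' loop
def rmLoop (text : String) : List String → String
  | [] => text
  | lead :: rest =>
    if PySem.Str.startswith text lead then
      PySem.Str.slice text (some (PySem.Str.len lead)) none
    else rmLoop text rest

def root_meaning (entry : List (String × String)) : String :=
  let text := PySem.Dict.getD (PySem.Dict.mk entry) "translation" ""
  rmLoop text
    ["from his ", "to his ", "in his ", "from the ", "to the ", "in the ", "the ", "his "]

-- ===== PORT B =====
-- first for-loop of B: 'rest = text; for prep …: if …: rest = text[len(prep):]; break'
-- as 'first stripped remainder, if any' (none = the loop left rest untouched)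
def altStripPrep (text : String) : List String → Option String
  | [] => none
  | p :: ps =>
    if PySem.Str.startswith text p then
      some (PySem.Str.slice text (some (PySem.Str.len p)) none)
    else altStripPrep text ps

-- second for-loop of B: strip a leading article/possessive from rest, else return text
def altStripArt (text rest : String) : List String → String
  | [] => text
  | a :: as =>
    if PySem.Str.startswith rest a then
      PySem.Str.slice rest (some (PySem.Str.len a)) none
    else altStripArt text rest as

def root_meaning_alt (entry : List (String × String)) : String :=
  let text := PySem.Dict.getD (PySem.Dict.mk entry) "translation" ""
  let rest := (altStripPrep text ["from ", "to ", "in "]).getD text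
  altStripArt text rest ["the ", "his "]

-- ===== PRECONDITION & SPEC =====
def Spec_root_meaning (entry : List (String × String)) (out : String) : Prop := out = root_meaning_alt entry
instance (entry : List (String × String)) (out : String) : Decidable (Spec_root_meaning entry out) := by unfold Spec_root_meaning; infer_instance

-- ===== CLAIM (what is proved, stated in full; the proofs are below) =====
def Claim_equal_root_meaning : Prop := ∀ (entry : List (String × String)), Dom_root_meaning entry → Spec_root_meaning entry (root_meaning entry)

-- ===== LEMMAS AND PROOFS =====

theorem sw_iff (t p : String) : PySem.Str.startswith t p = true ↔ p.toList <+: t.toList := by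
  simp [PySem.Str.startswith, PySem.Chars.startswith_iff]

theorem sw_false (t p : String) (h : ¬ p.toList <+: t.toList) : PySem.Str.startswith t p = false := by
  rw [Bool.eq_false_iff]; intro hc; exact h ((sw_iff t p).mp hc)

theorem sw_true (t p : String) (h : p.toList <+: t.toList) : PySem.Str.startswith t p = true :=
  (sw_iff t p).mpr h

theorem prefix_append_drop (a b L : List Char) : (a ++ b) <+: L ↔ a <+: L ∧ b <+: L.drop a.length := by
  constructor
  · rintro ⟨t, ht⟩
    subst ht
    refine ⟨⟨b ++ t, by simp⟩, ?_⟩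
    rw [List.append_assoc, List.drop_left]
    exact ⟨t, rfl⟩
  · rintro ⟨⟨u, hu⟩, hb⟩
    subst hu
    rw [List.drop_left] at hb
    obtain ⟨t, ht⟩ := hb
    exact ⟨t, by rw [List.append_assoc, ht]⟩

theorem not_prefix_of_prefix {a b L : List Char} (h : a <+: L) (hab : ¬ a <+: b) (hba : ¬ b <+: a) :
    ¬ b <+: L := fun hb => (List.prefix_or_prefix_of_prefix h hb).elim hab hba

theorem slice_ofNat (s : String) (n : Nat) :
    PySem.Str.slice s (some (n : Int)) none = String.ofList (s.toList.drop n) := by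
  simp [PySem.Str.slice, PySem.Chars.slice_eq_listSlice, PySem.List.slice_from_natCast]

theorem slice_slice (s : String) (m n : Nat) :
    PySem.Str.slice (PySem.Str.slice s (some (m:Int)) none) (some (n:Int)) none
      = String.ofList (s.toList.drop (m+n)) := by
  rw [slice_ofNat, slice_ofNat]
  simp [List.drop_drop]

-- the heart: A's eight-prefix scan equals B's two-stage strip, for every text
theorem core_eq (text : String) :
    rmLoop text ["from his ", "to his ", "in his ", "from the ", "to the ", "in the ", "the ", "his "]
      = altStripArt text ((altStripPrep text ["from ", "to ", "in "]).getD text) ["the ", "his "] := by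
  by_cases h1 : "from his ".toList <+: text.toList
  · -- text starts with "from his "
    have e1 : PySem.Str.startswith text "from his " = true := sw_true _ _ h1
    have hsplit : "from his ".toList = "from ".toList ++ "his ".toList := by decide
    have hpa := (prefix_append_drop "from ".toList "his ".toList text.toList).mp (hsplit ▸ h1)
    have hp : PySem.Str.startswith text "from " = true := sw_true _ _ hpa.1
    have hrest : PySem.Str.slice text (some (PySem.Str.len "from ")) none
        = String.ofList (text.toList.drop 5) := by
      rw [show PySem.Str.len "from " = ((5:Nat):Int) from by decide, slice_ofNat]
    have ha : "his ".toList <+: text.toList.drop 5 := by simpa using hpa.2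
    have athe : PySem.Str.startswith (PySem.Str.slice text (some (PySem.Str.len "from ")) none) "the " = false := by
      apply sw_false; rw [hrest]; simpa using not_prefix_of_prefix ha (by decide) (by decide)
    have aa : PySem.Str.startswith (PySem.Str.slice text (some (PySem.Str.len "from ")) none) "his " = true := by
      apply sw_true; rw [hrest]; simpa using ha
    simp only [rmLoop, altStripPrep, altStripArt, Option.getD_some, e1, athe, hp, aa, if_true, if_false, Bool.false_eq_true]
    rw [show PySem.Str.len "from his " = ((9:Nat):Int) from by decide,
        show PySem.Str.len "from " = ((5:Nat):Int) from by decide,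
        show PySem.Str.len "his " = ((4:Nat):Int) from by decide,
        slice_ofNat, slice_slice]
  by_cases h2 : "to his ".toList <+: text.toList
  · -- text starts with "to his "
    have e1 : PySem.Str.startswith text "from his " = false := sw_false _ _ h1
    have e2 : PySem.Str.startswith text "to his " = true := sw_true _ _ h2
    have hsplit : "to his ".toList = "to ".toList ++ "his ".toList := by decide
    have hpa := (prefix_append_drop "to ".toList "his ".toList text.toList).mp (hsplit ▸ h2)
    have epfrom : PySem.Str.startswith text "from " = false :=
      sw_false _ _ (not_prefix_of_prefix h2 (by decide) (by decide))
    have hp : PySem.Str.startswith text "to " = true := sw_true _ _ hpa.1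
    have hrest : PySem.Str.slice text (some (PySem.Str.len "to ")) none
        = String.ofList (text.toList.drop 3) := by
      rw [show PySem.Str.len "to " = ((3:Nat):Int) from by decide, slice_ofNat]
    have ha : "his ".toList <+: text.toList.drop 3 := by simpa using hpa.2
    have athe : PySem.Str.startswith (PySem.Str.slice text (some (PySem.Str.len "to ")) none) "the " = false := by
      apply sw_false; rw [hrest]; simpa using not_prefix_of_prefix ha (by decide) (by decide)
    have aa : PySem.Str.startswith (PySem.Str.slice text (some (PySem.Str.len "to ")) none) "his " = true := by
      apply sw_true; rw [hrest]; simpa using ha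
    simp only [rmLoop, altStripPrep, altStripArt, Option.getD_some, e1, e2, epfrom, athe, hp, aa, if_true, if_false, Bool.false_eq_true]
    rw [show PySem.Str.len "to his " = ((7:Nat):Int) from by decide,
        show PySem.Str.len "to " = ((3:Nat):Int) from by decide,
        show PySem.Str.len "his " = ((4:Nat):Int) from by decide,
        slice_ofNat, slice_slice]
  by_cases h3 : "in his ".toList <+: text.toList
  · -- text starts with "in his "
    have e1 : PySem.Str.startswith text "from his " = false := sw_false _ _ h1
    have e2 : PySem.Str.startswith text "to his " = false := sw_false _ _ h2
    have e3 : PySem.Str.startswith text "in his " = true := sw_true _ _ h3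
    have hsplit : "in his ".toList = "in ".toList ++ "his ".toList := by decide
    have hpa := (prefix_append_drop "in ".toList "his ".toList text.toList).mp (hsplit ▸ h3)
    have epfrom : PySem.Str.startswith text "from " = false :=
      sw_false _ _ (not_prefix_of_prefix h3 (by decide) (by decide))
    have epto : PySem.Str.startswith text "to " = false :=
      sw_false _ _ (not_prefix_of_prefix h3 (by decide) (by decide))
    have hp : PySem.Str.startswith text "in " = true := sw_true _ _ hpa.1
    have hrest : PySem.Str.slice text (some (PySem.Str.len "in ")) none
        = String.ofList (text.toList.drop 3) := by
      rw [show PySem.Str.len "in " = ((3:Nat):Int) from by decide, slice_ofNat]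
    have ha : "his ".toList <+: text.toList.drop 3 := by simpa using hpa.2
    have athe : PySem.Str.startswith (PySem.Str.slice text (some (PySem.Str.len "in ")) none) "the " = false := by
      apply sw_false; rw [hrest]; simpa using not_prefix_of_prefix ha (by decide) (by decide)
    have aa : PySem.Str.startswith (PySem.Str.slice text (some (PySem.Str.len "in ")) none) "his " = true := by
      apply sw_true; rw [hrest]; simpa using ha
    simp only [rmLoop, altStripPrep, altStripArt, Option.getD_some, e1, e2, e3, epfrom, epto, athe, hp, aa, if_true, if_false, Bool.false_eq_true]
    rw [show PySem.Str.len "in his " = ((7:Nat):Int) from by decide,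
        show PySem.Str.len "in " = ((3:Nat):Int) from by decide,
        show PySem.Str.len "his " = ((4:Nat):Int) from by decide,
        slice_ofNat, slice_slice]
  by_cases h4 : "from the ".toList <+: text.toList
  · -- text starts with "from the "
    have e1 : PySem.Str.startswith text "from his " = false := sw_false _ _ h1
    have e2 : PySem.Str.startswith text "to his " = false := sw_false _ _ h2
    have e3 : PySem.Str.startswith text "in his " = false := sw_false _ _ h3
    have e4 : PySem.Str.startswith text "from the " = true := sw_true _ _ h4
    have hsplit : "from the ".toList = "from ".toList ++ "the ".toList := by decide
    have hpa := (prefix_append_drop "from ".toList "the ".toList text.toList).mp (hsplit ▸ h4)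
    have hp : PySem.Str.startswith text "from " = true := sw_true _ _ hpa.1
    have hrest : PySem.Str.slice text (some (PySem.Str.len "from ")) none
        = String.ofList (text.toList.drop 5) := by
      rw [show PySem.Str.len "from " = ((5:Nat):Int) from by decide, slice_ofNat]
    have ha : "the ".toList <+: text.toList.drop 5 := by simpa using hpa.2
    have aa : PySem.Str.startswith (PySem.Str.slice text (some (PySem.Str.len "from ")) none) "the " = true := by
      apply sw_true; rw [hrest]; simpa using ha
    simp only [rmLoop, altStripPrep, altStripArt, Option.getD_some, e1, e2, e3, e4, hp, aa, if_true, if_false, Bool.false_eq_true]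
    rw [show PySem.Str.len "from the " = ((9:Nat):Int) from by decide,
        show PySem.Str.len "from " = ((5:Nat):Int) from by decide,
        show PySem.Str.len "the " = ((4:Nat):Int) from by decide,
        slice_ofNat, slice_slice]
  by_cases h5 : "to the ".toList <+: text.toList
  · -- text starts with "to the "
    have e1 : PySem.Str.startswith text "from his " = false := sw_false _ _ h1
    have e2 : PySem.Str.startswith text "to his " = false := sw_false _ _ h2
    have e3 : PySem.Str.startswith text "in his " = false := sw_false _ _ h3
    have e4 : PySem.Str.startswith text "from the " = false := sw_false _ _ h4
    have e5 : PySem.Str.startswith text "to the " = true := sw_true _ _ h5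
    have hsplit : "to the ".toList = "to ".toList ++ "the ".toList := by decide
    have hpa := (prefix_append_drop "to ".toList "the ".toList text.toList).mp (hsplit ▸ h5)
    have epfrom : PySem.Str.startswith text "from " = false :=
      sw_false _ _ (not_prefix_of_prefix h5 (by decide) (by decide))
    have hp : PySem.Str.startswith text "to " = true := sw_true _ _ hpa.1
    have hrest : PySem.Str.slice text (some (PySem.Str.len "to ")) none
        = String.ofList (text.toList.drop 3) := by
      rw [show PySem.Str.len "to " = ((3:Nat):Int) from by decide, slice_ofNat]
    have ha : "the ".toList <+: text.toList.drop 3 := by simpa using hpa.2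
    have aa : PySem.Str.startswith (PySem.Str.slice text (some (PySem.Str.len "to ")) none) "the " = true := by
      apply sw_true; rw [hrest]; simpa using ha
    simp only [rmLoop, altStripPrep, altStripArt, Option.getD_some, e1, e2, e3, e4, e5, epfrom, hp, aa, if_true, if_false, Bool.false_eq_true]
    rw [show PySem.Str.len "to the " = ((7:Nat):Int) from by decide,
        show PySem.Str.len "to " = ((3:Nat):Int) from by decide,
        show PySem.Str.len "the " = ((4:Nat):Int) from by decide,
        slice_ofNat, slice_slice]
  by_cases h6 : "in the ".toList <+: text.toList
  · -- text starts with "in the "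
    have e1 : PySem.Str.startswith text "from his " = false := sw_false _ _ h1
    have e2 : PySem.Str.startswith text "to his " = false := sw_false _ _ h2
    have e3 : PySem.Str.startswith text "in his " = false := sw_false _ _ h3
    have e4 : PySem.Str.startswith text "from the " = false := sw_false _ _ h4
    have e5 : PySem.Str.startswith text "to the " = false := sw_false _ _ h5
    have e6 : PySem.Str.startswith text "in the " = true := sw_true _ _ h6
    have hsplit : "in the ".toList = "in ".toList ++ "the ".toList := by decide
    have hpa := (prefix_append_drop "in ".toList "the ".toList text.toList).mp (hsplit ▸ h6)
    have epfrom : PySem.Str.startswith text "from " = false :=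
      sw_false _ _ (not_prefix_of_prefix h6 (by decide) (by decide))
    have epto : PySem.Str.startswith text "to " = false :=
      sw_false _ _ (not_prefix_of_prefix h6 (by decide) (by decide))
    have hp : PySem.Str.startswith text "in " = true := sw_true _ _ hpa.1
    have hrest : PySem.Str.slice text (some (PySem.Str.len "in ")) none
        = String.ofList (text.toList.drop 3) := by
      rw [show PySem.Str.len "in " = ((3:Nat):Int) from by decide, slice_ofNat]
    have ha : "the ".toList <+: text.toList.drop 3 := by simpa using hpa.2
    have aa : PySem.Str.startswith (PySem.Str.slice text (some (PySem.Str.len "in ")) none) "the " = true := by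
      apply sw_true; rw [hrest]; simpa using ha
    simp only [rmLoop, altStripPrep, altStripArt, Option.getD_some, e1, e2, e3, e4, e5, e6, epfrom, epto, hp, aa, if_true, if_false, Bool.false_eq_true]
    rw [show PySem.Str.len "in the " = ((7:Nat):Int) from by decide,
        show PySem.Str.len "in " = ((3:Nat):Int) from by decide,
        show PySem.Str.len "the " = ((4:Nat):Int) from by decide,
        slice_ofNat, slice_slice]
  by_cases h7 : "the ".toList <+: text.toList
  · -- text starts with "the "
    have e1 : PySem.Str.startswith text "from his " = false := sw_false _ _ h1
    have e2 : PySem.Str.startswith text "to his " = false := sw_false _ _ h2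
    have e3 : PySem.Str.startswith text "in his " = false := sw_false _ _ h3
    have e4 : PySem.Str.startswith text "from the " = false := sw_false _ _ h4
    have e5 : PySem.Str.startswith text "to the " = false := sw_false _ _ h5
    have e6 : PySem.Str.startswith text "in the " = false := sw_false _ _ h6
    have e7 : PySem.Str.startswith text "the " = true := sw_true _ _ h7
    have epfrom : PySem.Str.startswith text "from " = false :=
      sw_false _ _ (not_prefix_of_prefix h7 (by decide) (by decide))
    have epto : PySem.Str.startswith text "to " = false :=
      sw_false _ _ (not_prefix_of_prefix h7 (by decide) (by decide))
    have epin : PySem.Str.startswith text "in " = false :=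
      sw_false _ _ (not_prefix_of_prefix h7 (by decide) (by decide))
    simp only [rmLoop, altStripPrep, altStripArt, Option.getD_none, e1, e2, e3, e4, e5, e6, e7, epfrom, epto, epin, if_true, if_false, Bool.false_eq_true]
  by_cases h8 : "his ".toList <+: text.toList
  · -- text starts with "his "
    have e1 : PySem.Str.startswith text "from his " = false := sw_false _ _ h1
    have e2 : PySem.Str.startswith text "to his " = false := sw_false _ _ h2
    have e3 : PySem.Str.startswith text "in his " = false := sw_false _ _ h3
    have e4 : PySem.Str.startswith text "from the " = false := sw_false _ _ h4
    have e5 : PySem.Str.startswith text "to the " = false := sw_false _ _ h5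
    have e6 : PySem.Str.startswith text "in the " = false := sw_false _ _ h6
    have e7 : PySem.Str.startswith text "the " = false := sw_false _ _ h7
    have e8 : PySem.Str.startswith text "his " = true := sw_true _ _ h8
    have epfrom : PySem.Str.startswith text "from " = false :=
      sw_false _ _ (not_prefix_of_prefix h8 (by decide) (by decide))
    have epto : PySem.Str.startswith text "to " = false :=
      sw_false _ _ (not_prefix_of_prefix h8 (by decide) (by decide))
    have epin : PySem.Str.startswith text "in " = false :=
      sw_false _ _ (not_prefix_of_prefix h8 (by decide) (by decide))
    simp only [rmLoop, altStripPrep, altStripArt, Option.getD_none, e1, e2, e3, e4, e5, e6, e7, e8, epfrom, epto, epin, if_true, if_false, Bool.false_eq_true]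
  have e1 : PySem.Str.startswith text "from his " = false := sw_false _ _ h1
  have e2 : PySem.Str.startswith text "to his " = false := sw_false _ _ h2
  have e3 : PySem.Str.startswith text "in his " = false := sw_false _ _ h3
  have e4 : PySem.Str.startswith text "from the " = false := sw_false _ _ h4
  have e5 : PySem.Str.startswith text "to the " = false := sw_false _ _ h5
  have e6 : PySem.Str.startswith text "in the " = false := sw_false _ _ h6
  have e7 : PySem.Str.startswith text "the " = false := sw_false _ _ h7
  have e8 : PySem.Str.startswith text "his " = false := sw_false _ _ h8
  by_cases hffrom : "from ".toList <+: text.toList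
  · 
    have hp : PySem.Str.startswith text "from " = true := sw_true _ _ hffrom
    have hrest : PySem.Str.slice text (some (PySem.Str.len "from ")) none
        = String.ofList (text.toList.drop 5) := by
      rw [show PySem.Str.len "from " = ((5:Nat):Int) from by decide, slice_ofNat]
    have athe : PySem.Str.startswith (PySem.Str.slice text (some (PySem.Str.len "from ")) none) "the " = false := by
      apply sw_false; rw [hrest]; intro hc
      exact h4 ((prefix_append_drop "from ".toList "the ".toList text.toList).mpr ⟨hffrom, by simpa using hc⟩)
    have ahis : PySem.Str.startswith (PySem.Str.slice text (some (PySem.Str.len "from ")) none) "his " = false := by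
      apply sw_false; rw [hrest]; intro hc
      exact h1 ((prefix_append_drop "from ".toList "his ".toList text.toList).mpr ⟨hffrom, by simpa using hc⟩)
    simp only [rmLoop, altStripPrep, altStripArt, Option.getD_some, e1, e2, e3, e4, e5, e6, e7, e8, hp, athe, ahis, if_true, if_false, Bool.false_eq_true]
  · have epfrom : PySem.Str.startswith text "from " = false := sw_false _ _ hffrom
    by_cases hfto : "to ".toList <+: text.toList
    · 
      have hp : PySem.Str.startswith text "to " = true := sw_true _ _ hfto
      have hrest : PySem.Str.slice text (some (PySem.Str.len "to ")) none
          = String.ofList (text.toList.drop 3) := by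
        rw [show PySem.Str.len "to " = ((3:Nat):Int) from by decide, slice_ofNat]
      have athe : PySem.Str.startswith (PySem.Str.slice text (some (PySem.Str.len "to ")) none) "the " = false := by
        apply sw_false; rw [hrest]; intro hc
        exact h5 ((prefix_append_drop "to ".toList "the ".toList text.toList).mpr ⟨hfto, by simpa using hc⟩)
      have ahis : PySem.Str.startswith (PySem.Str.slice text (some (PySem.Str.len "to ")) none) "his " = false := by
        apply sw_false; rw [hrest]; intro hc
        exact h2 ((prefix_append_drop "to ".toList "his ".toList text.toList).mpr ⟨hfto, by simpa using hc⟩)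
      simp only [rmLoop, altStripPrep, altStripArt, Option.getD_some, e1, e2, e3, e4, e5, e6, e7, e8, epfrom, hp, athe, ahis, if_true, if_false, Bool.false_eq_true]
    · have epto : PySem.Str.startswith text "to " = false := sw_false _ _ hfto
      by_cases hfin : "in ".toList <+: text.toList
      · 
        have hp : PySem.Str.startswith text "in " = true := sw_true _ _ hfin
        have hrest : PySem.Str.slice text (some (PySem.Str.len "in ")) none
            = String.ofList (text.toList.drop 3) := by
          rw [show PySem.Str.len "in " = ((3:Nat):Int) from by decide, slice_ofNat]
        have athe : PySem.Str.startswith (PySem.Str.slice text (some (PySem.Str.len "in ")) none) "the " = false := by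
          apply sw_false; rw [hrest]; intro hc
          exact h6 ((prefix_append_drop "in ".toList "the ".toList text.toList).mpr ⟨hfin, by simpa using hc⟩)
        have ahis : PySem.Str.startswith (PySem.Str.slice text (some (PySem.Str.len "in ")) none) "his " = false := by
          apply sw_false; rw [hrest]; intro hc
          exact h3 ((prefix_append_drop "in ".toList "his ".toList text.toList).mpr ⟨hfin, by simpa using hc⟩)
        simp only [rmLoop, altStripPrep, altStripArt, Option.getD_some, e1, e2, e3, e4, e5, e6, e7, e8, epfrom, epto, hp, athe, ahis, if_true, if_false, Bool.false_eq_true]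
      · have epin : PySem.Str.startswith text "in " = false := sw_false _ _ hfin
        simp only [rmLoop, altStripPrep, altStripArt, Option.getD_none, e1, e2, e3, e4, e5, e6, e7, e8, epfrom, epto, epin, if_false, Bool.false_eq_true]


theorem root_meaning_spec : Claim_equal_root_meaning := by
  intro entry _
  unfold Spec_root_meaning root_meaning root_meaning_alt
  exact core_eq _
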